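-- pv_equiv track=rewrite | github.com/pypi-data/pypi-mirror-79 | packages/surfing/surfing-0.1.42.tar.gz/surfing-0.1.42/surfing/data/manager/score.py | _white_black_func
-- ===== SOURCE A (Python) =====
-- def _white_black_func(score, disproved_set):
--     del_list = []
--     for index_id in score:
--         for fund_id in score[index_id]:
--             if fund_id in disproved_set:
--                 # 之前是给非白名单 黑名单的基金给分数惩罚，但是基金数量不足时，会交易
--                 # 现在改为强逻辑，直接删掉
--                 #score[index_id][fund_id] += self.score_penalty_param.BlackListPenalty
--                 del_list.append([index_id, fund_id])
--     for del_i in del_list: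
--         del score[del_i[0]][del_i[1]]
--     return score
-- ===== SOURCE B (Python) =====
-- # B rebuilds the nested dict in one comprehension pass (keeping an inner dict as-is
-- # when the blacklist does not touch it) instead of collecting a del_list and mutating;
-- # equivalence is about the RETURN value (A mutates score in place, B leaves it untouched).
-- def _white_black_func(score, disproved_set):
--     banned = set(disproved_set)
--     return {index_id: (inner if banned.isdisjoint(inner)
--                        else {fund_id: v for fund_id, v in inner.items() if fund_id not in banned})
--             for index_id, inner in score.items()}
-- ===== Notes on version B (the rewrite author's own statement) =====
-- stated objective: simpler
-- what changed: Replaces the two-phase mutate-in-place algorithm (collect a del_list while scanning, then a second loop of del statements) by a single nested dict comprehension that rebuilds the structure keeping only non-blacklisted funds (inner dicts disjoint from the blacklist are kept as is), with the blacklist turned into a set once; B does not mutate its argument.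
import Mathlib
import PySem

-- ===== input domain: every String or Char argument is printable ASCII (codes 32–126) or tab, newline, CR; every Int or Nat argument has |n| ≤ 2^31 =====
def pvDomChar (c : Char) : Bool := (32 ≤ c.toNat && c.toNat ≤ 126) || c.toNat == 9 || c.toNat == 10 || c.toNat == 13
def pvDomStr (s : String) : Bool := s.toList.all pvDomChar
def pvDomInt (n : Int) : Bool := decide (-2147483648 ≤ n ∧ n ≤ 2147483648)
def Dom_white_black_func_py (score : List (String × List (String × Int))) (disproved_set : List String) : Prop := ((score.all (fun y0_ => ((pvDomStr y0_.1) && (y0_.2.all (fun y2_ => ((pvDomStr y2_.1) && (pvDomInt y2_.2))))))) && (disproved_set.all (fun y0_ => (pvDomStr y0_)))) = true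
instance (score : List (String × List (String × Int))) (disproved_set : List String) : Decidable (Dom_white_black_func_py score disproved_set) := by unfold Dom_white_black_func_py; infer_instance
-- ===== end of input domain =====

-- ===== PORT A =====
-- Both ports receive the dict arguments as association lists; pvToDict_wb is the
-- dict(...) normalisation (Python dict semantics: later duplicate keys overwrite,
-- first position kept) applied to the nested input, shared by both ports.
def pvToDict_wb (score : List (String × List (String × Int))) :
    PySem.Dict String (PySem.Dict String Int) :=
  PySem.Dict.ofList (score.map (fun p => (p.1, PySem.Dict.ofList p.2)))

-- literal transliteration of A: collect del_list over the nested keys, then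
-- a second loop performing the deletions, return the (mutated) dict's items
def white_black_func_py (score : List (String × List (String × Int))) (disproved_set : List String) : List (String × List (String × Int)) :=
  let d := pvToDict_wb score
  let del_list : List (String × String) :=
    d.keys.foldl (fun acc index_id =>
      (d.getD index_id PySem.Dict.empty).keys.foldl (fun acc2 fund_id =>
        if disproved_set.contains fund_id then acc2 ++ [(index_id, fund_id)] else acc2) acc) []
  let d2 := del_list.foldl
      (fun dd del_i => dd.modify del_i.1 PySem.Dict.empty (fun inner => inner.erase del_i.2)) d
  d2.items.map (fun p => (p.1, p.2.items))

-- ===== PORT B =====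
-- literal transliteration of B: one nested comprehension filtering against the set
-- (an inner dict untouched by the blacklist — banned.isdisjoint(inner) — is kept as is);
-- the proved equivalence is about the RETURN value: Python A mutates score in place, B does not
def white_black_func_py_alt (score : List (String × List (String × Int))) (disproved_set : List String) : List (String × List (String × Int)) :=
  let banned := PySem.Set.ofList disproved_set
  (pvToDict_wb score).items.map (fun p =>
    (p.1, if p.2.keys.all (fun f => !(banned.contains f)) then p.2.items
          else p.2.items.filter (fun q => !(banned.contains q.1))))

-- ===== PRECONDITION & SPEC =====
def Spec_white_black_func_py (score : List (String × List (String × Int))) (disproved_set : List String) (out : List (String × List (String × Int))) : Prop := out = white_black_func_py_alt score disproved_set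
instance (score : List (String × List (String × Int))) (disproved_set : List String) (out : List (String × List (String × Int))) : Decidable (Spec_white_black_func_py score disproved_set out) := by unfold Spec_white_black_func_py; infer_instance

-- ===== CLAIM (what is proved, stated in full; the proofs are below) =====
def Claim_equal_white_black_func_py : Prop := ∀ (score : List (String × List (String × Int))) (disproved_set : List String), Dom_white_black_func_py score disproved_set → Spec_white_black_func_py score disproved_set (white_black_func_py score disproved_set)

-- ===== LEMMAS AND PROOFS =====

-- the inner collecting loop: a fold appending (i, f) for filtered f
theorem wb_foldl_if_append {α β : Type} (c : α → Bool) (g : α → β) :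
    ∀ (ks : List α) (acc : List β),
      ks.foldl (fun a f => if c f then a ++ [g f] else a) acc = acc ++ (ks.filter c).map g := by
  intro ks
  induction ks with
  | nil => intro acc; simp
  | cons x xs ih =>
    intro acc
    by_cases h : c x = true
    · simp [List.foldl_cons, h, ih, List.filter_cons_of_pos h]
    · simp only [Bool.not_eq_true] at h
      simp [List.foldl_cons, h, ih, List.filter_cons_of_neg]

theorem wb_foldl_append {α β : Type} (seg : α → List β) :
    ∀ (l : List α) (acc : List β),
      l.foldl (fun a i => a ++ seg i) acc = acc ++ l.flatMap seg := by
  intro l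
  induction l with
  | nil => intro acc; simp
  | cons x xs ih => intro acc; simp [List.foldl_cons, ih]

-- the whole del_list as a flatMap over the outer keys
theorem wb_del_list_eq (d : PySem.Dict String (PySem.Dict String Int)) (ds : List String) :
    d.keys.foldl (fun acc index_id =>
        (d.getD index_id PySem.Dict.empty).keys.foldl (fun acc2 fund_id =>
          if ds.contains fund_id then acc2 ++ [(index_id, fund_id)] else acc2) acc) []
      = d.keys.flatMap (fun i =>
          ((d.getD i PySem.Dict.empty).keys.filter (fun f => ds.contains f)).map (fun f => (i, f))) := by
  have hstep : (fun (acc : List (String × String)) index_id =>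
        (d.getD index_id PySem.Dict.empty).keys.foldl (fun acc2 fund_id =>
          if ds.contains fund_id then acc2 ++ [(index_id, fund_id)] else acc2) acc)
      = fun acc i => acc ++ ((d.getD i PySem.Dict.empty).keys.filter (fun f => ds.contains f)).map (fun f => (i, f)) := by
    funext acc i
    exact wb_foldl_if_append _ _ _ _
  rw [hstep, wb_foldl_append]
  simp

-- getD through the deleting fold: only the pairs keyed at k matter
theorem wb_getD_foldl_modify (l : List (String × String)) :
    ∀ (dd : PySem.Dict String (PySem.Dict String Int)) (k : String),
      (l.foldl (fun dd p => dd.modify p.1 PySem.Dict.empty (fun m => m.erase p.2)) dd).getD k PySem.Dict.empty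
        = ((l.filter (fun p => p.1 == k)).map (·.2)).foldl (fun m f => m.erase f)
            (dd.getD k PySem.Dict.empty) := by
  induction l with
  | nil => intro dd k; simp
  | cons p l ih =>
    intro dd k
    rw [List.foldl_cons, ih, List.filter_cons]
    by_cases h : p.1 = k
    · subst h
      simp [PySem.Dict.getD_modify_self]
    · have hb : (p.1 == k) = false := by simpa using h
      rw [PySem.Dict.getD_modify_of_ne dd PySem.Dict.empty (fun m => m.erase p.2) (Ne.symm h)]
      simp [hb]

-- a fold of erases filters out every listed key
theorem wb_erase_foldl (fs : List String) :
    ∀ (m : PySem.Dict String Int),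
      (fs.foldl (fun m f => m.erase f) m).items
        = m.items.filter (fun q => !(fs.contains q.1)) := by
  induction fs with
  | nil => intro m; simp
  | cons f fs ih =>
    intro m
    rw [List.foldl_cons, ih]
    show (List.filter _ m.items).filter _ = _
    rw [List.filter_filter]
    apply List.filter_congr
    intro q _
    apply Bool.eq_iff_iff.mpr
    simp
    tauto

-- every pair collected into del_list is keyed by an outer key
theorem wb_mem_flatMap_fst {g : String → List String} {ks : List String}
    {p : String × String} (h : p ∈ ks.flatMap (fun i => (g i).map (fun f => (i, f)))) :
    p.1 ∈ ks := by
  simp only [List.mem_flatMap, List.mem_map] at h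
  obtain ⟨i, hi, f, _, hpe⟩ := h
  subst hpe; exact hi

-- filtering the flatMap at an outer key recovers exactly that key's segment
theorem wb_filter_flatMap (g : String → List String) :
    ∀ (ks : List String), ks.Nodup → ∀ k ∈ ks,
      ((ks.flatMap (fun i => (g i).map (fun f => (i, f)))).filter
          (fun p : String × String => p.1 == k)).map (·.2) = g k := by
  intro ks
  induction ks with
  | nil => intro _ k hk; simp at hk
  | cons i ks ih =>
    intro hnd k hk
    rw [List.flatMap_cons, List.filter_append, List.map_append]
    rcases List.mem_cons.mp hk with h | h
    · subst h
      have h1 : ((g k).map (fun f => (k, f))).filter (fun p : String × String => p.1 == k)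
          = (g k).map (fun f => (k, f)) := by
        apply List.filter_eq_self.mpr
        intro p hp
        simp only [List.mem_map] at hp
        obtain ⟨f, _, hpe⟩ := hp
        subst hpe; simp
      have h2 : (ks.flatMap (fun i => (g i).map (fun f => (i, f)))).filter
          (fun p : String × String => p.1 == k) = [] := by
        apply List.filter_eq_nil_iff.mpr
        intro p hp
        have := wb_mem_flatMap_fst hp
        have hki : k ∉ ks := (List.nodup_cons.mp hnd).1
        simp only [beq_iff_eq]
        intro hpk
        exact hki (hpk ▸ this)
      rw [h1, h2]
      simp
    · have hik : i ≠ k := by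
        rintro rfl
        exact (List.nodup_cons.mp hnd).1 h
      have h1 : ((g i).map (fun f => (i, f))).filter (fun p : String × String => p.1 == k) = [] := by
        apply List.filter_eq_nil_iff.mpr
        intro p hp
        simp only [List.mem_map] at hp
        obtain ⟨f, _, hpe⟩ := hp
        subst hpe
        simpa using hik
      rw [h1]
      simpa using ih (List.nodup_cons.mp hnd).2 k h

theorem wb_main (score : List (String × List (String × Int))) (disproved_set : List String) :
    white_black_func_py score disproved_set = white_black_func_py_alt score disproved_set := by
  simp only [white_black_func_py, white_black_func_py_alt, pvToDict_wb]
  set d := PySem.Dict.ofList (List.map (fun p => (p.1, PySem.Dict.ofList p.2)) score) with hd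
  have hnd : d.keys.Nodup := PySem.Dict.nodup_keys_ofList _
  rw [wb_del_list_eq]
  set del := d.keys.flatMap (fun i =>
      ((d.getD i PySem.Dict.empty).keys.filter (fun f => disproved_set.contains f)).map
        (fun f => (i, f))) with hdel
  set d2 := del.foldl
      (fun dd p => dd.modify p.1 PySem.Dict.empty (fun m => m.erase p.2)) d with hd2
  have hkeys : d2.keys = d.keys := by
    have h := PySem.Dict.keys_foldl_modify_key del Prod.fst PySem.Dict.empty
        (fun _ p m => m.erase p.2) d
    have h2 : d2.keys = PySem.Set.update d.keys (del.map Prod.fst) := by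
      rw [hd2]; exact h
    rw [h2, PySem.Set.update_eq_append_filter]
    have hnil : List.filter (fun y => !PySem.Set.contains d.keys y)
        (PySem.Set.ofList (del.map Prod.fst)) = [] := by
      apply List.filter_eq_nil_iff.mpr
      intro y hy
      have hy' : y ∈ del.map Prod.fst := (PySem.Set.mem_ofList _ _).mp hy
      obtain ⟨p, hp, rfl⟩ := List.mem_map.mp hy'
      have hmem : p.1 ∈ d.keys := wb_mem_flatMap_fst (hdel ▸ hp)
      simp [PySem.Set.contains, hmem]
    rw [hnil, List.append_nil]
  have hnd2 : d2.keys.Nodup := hkeys ▸ hnd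
  rw [PySem.Dict.items_eq_map_keys d2 hnd2 PySem.Dict.empty,
      PySem.Dict.items_eq_map_keys d hnd PySem.Dict.empty, hkeys, List.map_map, List.map_map]
  apply List.map_congr_left
  intro k hk
  simp only [Function.comp_apply]
  refine congrArg (Prod.mk k) ?_
  have hgd : d2.getD k PySem.Dict.empty
      = (((d.getD k PySem.Dict.empty).keys.filter (fun f => disproved_set.contains f)).foldl
          (fun m f => m.erase f) (d.getD k PySem.Dict.empty)) := by
    rw [hd2, wb_getD_foldl_modify, hdel]
    rw [wb_filter_flatMap
      (fun i => (d.getD i PySem.Dict.empty).keys.filter (fun f => disproved_set.contains f))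
      d.keys hnd k hk]
  rw [hgd, wb_erase_foldl]
  have hmain : (d.getD k PySem.Dict.empty).items.filter
        (fun q => !(((d.getD k PySem.Dict.empty).keys.filter
          (fun f => disproved_set.contains f)).contains q.1))
      = (d.getD k PySem.Dict.empty).items.filter
        (fun q => !((PySem.Set.ofList disproved_set).contains q.1)) := by
    apply List.filter_congr
    intro q hq
    have hqk : q.1 ∈ (d.getD k PySem.Dict.empty).keys :=
      PySem.Dict.mem_keys_of_mem_items _ hq
    have h1 : ((d.getD k PySem.Dict.empty).keys.filter
        (fun f => disproved_set.contains f)).contains q.1 = disproved_set.contains q.1 := by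
      apply Bool.eq_iff_iff.mpr
      simp [List.mem_filter, hqk]
    have h2 : (PySem.Set.ofList disproved_set).contains q.1 = disproved_set.contains q.1 := by
      apply Bool.eq_iff_iff.mpr
      simp [PySem.Set.contains, PySem.Set.mem_ofList]
    rw [h1, h2]
  rw [hmain]
  by_cases hall : (d.getD k PySem.Dict.empty).keys.all
      (fun f => !((PySem.Set.ofList disproved_set).contains f)) = true
  · rw [if_pos hall]
    apply List.filter_eq_self.mpr
    intro q hq
    exact List.all_eq_true.mp hall q.1 (PySem.Dict.mem_keys_of_mem_items _ hq)
  · rw [if_neg hall]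

-- ===== VERDICT (by name: the statement is the Claim_ definition above) =====
theorem white_black_func_py_spec : Claim_equal_white_black_func_py := by
  intro score ds _
  unfold Spec_white_black_func_py
  exact wb_main score ds
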